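-- pv_equiv track=rewrite | github.com/yogvidwankhede/VentureOS | app.py | _fallback_select_image_slide_indices
-- ===== SOURCE A (Python) =====
-- def _fallback_clean_text(value, fallback=''):
--     if value is None:
--         return fallback
--     text = str(value).strip()
--     return text or fallback
--
-- def _fallback_select_image_slide_indices(slides, image_options):
--     slides = slides or []
--     if not slides:
--         return set()
--
--     coverage = _fallback_clean_text((image_options or {}).get('coverage'), 'key-slides').lower()
--     type_lookup = {}
--     for index, slide in enumerate(slides):
--         slide_type = _fallback_clean_text((slide or {}).get('type')).lower()
--         if slide_type and slide_type not in type_lookup: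
--             type_lookup[slide_type] = index
--
--     key_order = [
--         type_lookup.get('hook', 0),
--         type_lookup.get('problem', 1 if len(slides) > 1 else 0),
--         type_lookup.get('solution', min(3, len(slides) - 1)),
--         type_lookup.get('how_it_works', min(4, len(slides) - 1)),
--         type_lookup.get('impact', min(5, len(slides) - 1)),
--         type_lookup.get('proof', min(6, len(slides) - 1)),
--         type_lookup.get('vision', min(len(slides) - 2, len(slides) - 1)),
--         type_lookup.get('call_to_action', len(slides) - 1),
--     ]
--
--     ordered = []
--     seen = set()
--     for index in key_order:
--         if index is None:
--             continue
--         safe_index = max(0, min(len(slides) - 1, index))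
--         if safe_index not in seen:
--             seen.add(safe_index)
--             ordered.append(safe_index)
--
--     if coverage == 'all':
--         return set(range(len(slides)))
--     if coverage == 'image-heavy':
--         return set(range(min(len(slides), max(7, len(ordered)))))
--     if coverage == 'key-slides':
--         return set(ordered[:5])
--     return set(ordered[:2] or [0])
-- ===== SOURCE B (Python) =====
-- def _fallback_clean_text(value, fallback=''):
--     if value is None:
--         return fallback
--     text = str(value).strip()
--     return text or fallback
--
-- def _slide_type(slide):
--     return _fallback_clean_text((slide or {}).get('type')).lower()
--
-- def _fallback_select_image_slide_indices(slides, image_options):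
--     slides = slides or []
--     n = len(slides)
--     if n == 0:
--         return set()
--     coverage = _fallback_clean_text((image_options or {}).get('coverage'), 'key-slides').lower()
--     if coverage == 'all':
--         return set(range(n))
--
--     specs = [
--         ('hook', 0),
--         ('problem', 1 if n > 1 else 0),
--         ('solution', min(3, n - 1)),
--         ('how_it_works', min(4, n - 1)),
--         ('impact', min(5, n - 1)),
--         ('proof', min(6, n - 1)),
--         ('vision', min(n - 2, n - 1)),
--         ('call_to_action', n - 1),
--     ]
--
--     def pick(rest, acc):
--         if not rest:
--             return acc
--         target, default = rest[0]
--         idx = next((i for i, s in enumerate(slides) if _slide_type(s) == target), default)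
--         idx = max(0, min(n - 1, idx))
--         return pick(rest[1:], acc if idx in acc else acc + [idx])
--
--     ordered = pick(specs, [])
--
--     if coverage == 'image-heavy':
--         return set(range(min(n, max(7, len(ordered)))))
--     if coverage == 'key-slides':
--         return set(ordered[:5])
--     return set(ordered[:2] or [0])
-- ===== Notes on version B (the rewrite author's own statement) =====
-- stated objective: alternative
-- what changed: B branches on coverage first so 'all' returns range(n) without scanning any slide, and fuses A's three staged passes (type_lookup dict build, key_order list, seen-set dedupe loop) into one recursion over eight (type, default) spec pairs that scans for the first slide of each type, clamps, and appends to a duplicate-free accumulator.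
import Mathlib
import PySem

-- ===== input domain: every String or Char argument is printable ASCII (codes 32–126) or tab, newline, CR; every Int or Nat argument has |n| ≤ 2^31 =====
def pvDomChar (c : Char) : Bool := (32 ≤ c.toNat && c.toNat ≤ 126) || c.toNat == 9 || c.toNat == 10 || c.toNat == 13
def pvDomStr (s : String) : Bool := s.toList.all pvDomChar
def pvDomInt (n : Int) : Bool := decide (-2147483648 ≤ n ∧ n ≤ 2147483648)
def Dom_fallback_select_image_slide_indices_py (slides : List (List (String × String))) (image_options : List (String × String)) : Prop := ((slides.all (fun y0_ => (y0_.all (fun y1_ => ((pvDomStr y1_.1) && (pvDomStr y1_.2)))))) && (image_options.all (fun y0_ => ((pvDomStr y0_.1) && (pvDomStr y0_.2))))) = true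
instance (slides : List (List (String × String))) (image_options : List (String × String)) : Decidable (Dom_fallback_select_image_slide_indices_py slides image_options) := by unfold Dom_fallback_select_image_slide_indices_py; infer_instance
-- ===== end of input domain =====

-- B short-circuits 'all' before any slide scan and fuses A's three staged passes
-- (type_lookup dict build, key_order list, seen-set dedupe loop) into one recursion
-- over eight (type, default) specs with a list accumulator (objective: alternative).

-- ===== PORT A =====
-- _fallback_clean_text (shared module helper, used by both Pythons)
def pvCleanText (value : Option String) (fallback : String) : String :=
  match value with
  | none => fallback
  | some v =>
    let text := PySem.Str.strip v
    if text = "" then fallback else text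

-- cleaned, lowered slide['type'] ((slide or {}).get('type') = first-match lookup on the assoc list)
def pvSlideType (slide : List (String × String)) : String :=
  PySem.Str.lower (pvCleanText ((PySem.Dict.mk slide).get? "type") "")

-- one iteration of A's type_lookup-building loop ('slide_type and slide_type not in type_lookup')
def pvLookupStep (d : PySem.Dict String Int) (p : Int × List (String × String)) : PySem.Dict String Int :=
  let st := pvSlideType p.2
  if st ≠ "" ∧ d.get? st = none then d.insert st p.1 else d

-- one iteration of A's dedupe loop (state = (ordered, seen)); the 'index is None'
-- continue can never fire (all key_order entries are ints) and has no Lean counterpart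
def pvDedupStep (n : Int) (p : List Int × PySem.Set Int) (idx : Int) : List Int × PySem.Set Int :=
  let safe := max 0 (min (n - 1) idx)
  if PySem.Set.contains p.2 safe then p else (p.1 ++ [safe], PySem.Set.add p.2 safe)

def fallback_select_image_slide_indices_py (slides : List (List (String × String))) (image_options : List (String × String)) : List Int :=
  if slides = [] then []
  else
    let n : Int := (slides.length : Int)
    let coverage := PySem.Str.lower (pvCleanText ((PySem.Dict.mk image_options).get? "coverage") "key-slides")
    let type_lookup := (PySem.List.enumerate slides).foldl pvLookupStep PySem.Dict.empty
    let key_order : List Int := [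
      type_lookup.getD "hook" 0,
      type_lookup.getD "problem" (if slides.length > 1 then 1 else 0),
      type_lookup.getD "solution" (min 3 (n - 1)),
      type_lookup.getD "how_it_works" (min 4 (n - 1)),
      type_lookup.getD "impact" (min 5 (n - 1)),
      type_lookup.getD "proof" (min 6 (n - 1)),
      type_lookup.getD "vision" (min (n - 2) (n - 1)),
      type_lookup.getD "call_to_action" (n - 1)]
    let ordered := (key_order.foldl (pvDedupStep n) ([], PySem.Set.empty)).1
    if coverage = "all" then PySem.List.pyRange 0 n 1
    else if coverage = "image-heavy" then PySem.List.pyRange 0 (min n (max 7 (ordered.length : Int))) 1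
    else if coverage = "key-slides" then ordered.take 5
    else (if ordered.take 2 = [] then [0] else ordered.take 2)

-- ===== PORT B =====
-- B's inner 'pick' recursion: for each (target, default) spec in turn, find the first
-- slide of that type (the 'next' generator), clamp, append if unseen, recurse
def pvPick (slides : List (List (String × String))) (n : Int) : List (String × Int) → List Int → List Int
  | [], acc => acc
  | spec :: rest, acc =>
    let idx0 : Int :=
      match (PySem.List.enumerate slides).find? (fun p => pvSlideType p.2 == spec.1) with
      | some p => p.1
      | none => spec.2
    let idx := max 0 (min (n - 1) idx0)
    pvPick slides n rest (if idx ∈ acc then acc else acc ++ [idx])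

def fallback_select_image_slide_indices_py_alt (slides : List (List (String × String))) (image_options : List (String × String)) : List Int :=
  let n : Int := (slides.length : Int)
  if n = 0 then []
  else
    let coverage := PySem.Str.lower (pvCleanText ((PySem.Dict.mk image_options).get? "coverage") "key-slides")
    if coverage = "all" then PySem.List.pyRange 0 n 1
    else
      let specs : List (String × Int) := [
        ("hook", 0),
        ("problem", if slides.length > 1 then 1 else 0),
        ("solution", min 3 (n - 1)),
        ("how_it_works", min 4 (n - 1)),
        ("impact", min 5 (n - 1)),
        ("proof", min 6 (n - 1)),
        ("vision", min (n - 2) (n - 1)),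
        ("call_to_action", n - 1)]
      let ordered := pvPick slides n specs []
      if coverage = "image-heavy" then PySem.List.pyRange 0 (min n (max 7 (ordered.length : Int))) 1
      else if coverage = "key-slides" then ordered.take 5
      else (if ordered.take 2 = [] then [0] else ordered.take 2)

-- ===== PRECONDITION & SPEC =====
def Spec_fallback_select_image_slide_indices_py (slides : List (List (String × String))) (image_options : List (String × String)) (out : List Int) : Prop := out = fallback_select_image_slide_indices_py_alt slides image_options
instance (slides : List (List (String × String))) (image_options : List (String × String)) (out : List Int) : Decidable (Spec_fallback_select_image_slide_indices_py slides image_options out) := by unfold Spec_fallback_select_image_slide_indices_py; infer_instance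

-- ===== CLAIM =====
def Claim_equal_fallback_select_image_slide_indices_py : Prop := ∀ (slides : List (List (String × String))) (image_options : List (String × String)), Dom_fallback_select_image_slide_indices_py slides image_options → Spec_fallback_select_image_slide_indices_py slides image_options (fallback_select_image_slide_indices_py slides image_options)

-- ===== LEMMAS AND PROOFS =====

-- B's first-occurrence scan, as a named function for the lemmas
def pvFirstOf (slides : List (List (String × String))) (target : String) (default : Int) : Int :=
  match (PySem.List.enumerate slides).find? (fun p => pvSlideType p.2 == target) with
  | some p => p.1
  | none => default

-- A's lookup fold answers any NONEMPTY key by the first matching pair of ps (or the start dict)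
theorem pvLookup_get? (ps : List (Int × List (String × String))) (t : String) (ht : t ≠ "")
    (d0 : PySem.Dict String Int) :
    (ps.foldl pvLookupStep d0).get? t
      = ((d0.get? t).or ((ps.find? (fun p => pvSlideType p.2 == t)).map (·.1))) := by
  induction ps generalizing d0 with
  | nil => simp
  | cons p rest ih =>
    simp only [List.foldl_cons, List.find?]
    by_cases hst : pvSlideType p.2 = t
    · simp only [hst, beq_self_eq_true]
      by_cases hc : d0.get? t = none
      · rw [show pvLookupStep d0 p = d0.insert t p.1 by
          simp [pvLookupStep, hst, ht, hc]]
        rw [ih]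
        simp [PySem.Dict.get?_insert_self, hc, Option.or]
      · rw [show pvLookupStep d0 p = d0 by simp [pvLookupStep, hst, hc]]
        rw [ih]
        cases h : d0.get? t with
        | none => exact absurd h hc
        | some v => simp [Option.or]
    · have hbeq : (pvSlideType p.2 == t) = false := by
        simp [hst]
      simp only [hbeq]
      have hgt : (pvLookupStep d0 p).get? t = d0.get? t := by
        show (if pvSlideType p.2 ≠ "" ∧ d0.get? (pvSlideType p.2) = none
              then d0.insert (pvSlideType p.2) p.1 else d0).get? t = d0.get? t
        split
        · exact PySem.Dict.get?_insert_of_ne _ _ (fun h => hst h.symm)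
        · rfl
      rw [ih, hgt]

theorem pvLookup_getD (slides : List (List (String × String))) (t : String) (ht : t ≠ "") (d : Int) :
    ((PySem.List.enumerate slides).foldl pvLookupStep PySem.Dict.empty).getD t d
      = pvFirstOf slides t d := by
  rw [PySem.Dict.getD_eq_get?_getD]
  rw [pvLookup_get? _ t ht]
  unfold pvFirstOf
  cases h : (PySem.List.enumerate slides).find? (fun p => pvSlideType p.2 == t) with
  | none => simp [Option.or]
  | some p => simp [Option.or]

-- B's fused pick recursion = A's dedupe fold over the per-spec first-occurrence indices
theorem pvPick_eq_foldl (slides : List (List (String × String))) (n : Int)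
    (specs : List (String × Int)) (acc : List Int) :
    pvPick slides n specs acc
      = ((specs.map (fun s => pvFirstOf slides s.1 s.2)).foldl (pvDedupStep n) (acc, acc)).1 := by
  induction specs generalizing acc with
  | nil => rfl
  | cons s rest ih =>
    simp only [List.map_cons, List.foldl_cons]
    have hfo : pvFirstOf slides s.1 s.2
        = (match (PySem.List.enumerate slides).find? (fun p => pvSlideType p.2 == s.1) with
           | some p => p.1
           | none => s.2) := rfl
    show pvPick slides n rest
        (if max 0 (min (n - 1) (pvFirstOf slides s.1 s.2)) ∈ acc then acc
         else acc ++ [max 0 (min (n - 1) (pvFirstOf slides s.1 s.2))])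
      = ((rest.map (fun s => pvFirstOf slides s.1 s.2)).foldl (pvDedupStep n)
          (pvDedupStep n (acc, acc) (pvFirstOf slides s.1 s.2))).1
    have hstep : pvDedupStep n (acc, acc) (pvFirstOf slides s.1 s.2)
        = (let m := max 0 (min (n - 1) (pvFirstOf slides s.1 s.2));
           (if m ∈ acc then acc else acc ++ [m], if m ∈ acc then acc else acc ++ [m])) := by
      unfold pvDedupStep PySem.Set.contains PySem.Set.add
      by_cases hm : max 0 (min (n - 1) (pvFirstOf slides s.1 s.2)) ∈ acc <;> simp [hm]
    rw [hstep]
    simp only []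
    split <;> exact ih _

-- ===== VERDICT =====
theorem fallback_select_image_slide_indices_py_spec : Claim_equal_fallback_select_image_slide_indices_py := by
  intro slides image_options _
  unfold Spec_fallback_select_image_slide_indices_py
  unfold fallback_select_image_slide_indices_py fallback_select_image_slide_indices_py_alt
  by_cases h : slides = []
  · simp [h]
  · have hn : ((slides.length : Int) = 0) = False := by
      simp [List.length_eq_zero_iff, h]
    simp only [if_neg h, hn, if_false]
    rw [pvLookup_getD slides "hook" (by decide),
        pvLookup_getD slides "problem" (by decide),
        pvLookup_getD slides "solution" (by decide),
        pvLookup_getD slides "how_it_works" (by decide),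
        pvLookup_getD slides "impact" (by decide),
        pvLookup_getD slides "proof" (by decide),
        pvLookup_getD slides "vision" (by decide),
        pvLookup_getD slides "call_to_action" (by decide)]
    rw [pvPick_eq_foldl]
    rfl
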